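-- pv_equiv track=rewrite | github.com/0ptimus-Prim3/ao-hash-comparison | native_and_libsnark/utils/anemoi_rounds.py | get_number_of_rounds
-- ===== SOURCE A (Python) =====
-- from math import floor, ceil, comb
--
-- def get_number_of_rounds(ell, alpha, security_level):
--     kappa = (1, 1, 1, 1, 2, 2, 4, 4, 7, 7)
--     sl = 1 << security_level
--
--     for r in range(100):
--         k = kappa[alpha] if alpha < len(kappa) else 9
--         c_alg = comb(2 * ell * r + alpha + 1 + 2 * (ell * r - 2), 2 * ell * r)
--         c_alg *= c_alg
--         if c_alg >= sl:
--             return max(10, r + 1 + ell)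
--
--     return 10
-- ===== SOURCE B (Python) =====
-- from math import comb
--
--
-- def get_number_of_rounds(ell, alpha, security_level):
--     sl = 1 << security_level
--
--     def meets(r):
--         c = comb(2 * ell * r + alpha + 1 + 2 * (ell * r - 2), 2 * ell * r)
--         return c * c >= sl
--
--     # meets is monotone non-decreasing in r, so binary-search the least r in [0, 100)
--     lo, hi = 0, 100
--     while lo < hi:
--         mid = (lo + hi) // 2
--         if meets(mid):
--             hi = mid
--         else:
--             lo = mid + 1
--     return max(10, lo + 1 + ell) if lo < 100 else 10
-- ===== Notes on version B (the rewrite author's own statement) =====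
-- stated objective: alternative
-- what changed: Replaces A's linear scan over r=0..99 with a binary search for the least r satisfying the (monotone) combinatorial threshold, and drops the unused kappa lookup.
-- outside the precondition, e.g. on get_number_of_rounds(-5, 3, 0): A returns 10, B raises ValueError
import Mathlib
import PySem

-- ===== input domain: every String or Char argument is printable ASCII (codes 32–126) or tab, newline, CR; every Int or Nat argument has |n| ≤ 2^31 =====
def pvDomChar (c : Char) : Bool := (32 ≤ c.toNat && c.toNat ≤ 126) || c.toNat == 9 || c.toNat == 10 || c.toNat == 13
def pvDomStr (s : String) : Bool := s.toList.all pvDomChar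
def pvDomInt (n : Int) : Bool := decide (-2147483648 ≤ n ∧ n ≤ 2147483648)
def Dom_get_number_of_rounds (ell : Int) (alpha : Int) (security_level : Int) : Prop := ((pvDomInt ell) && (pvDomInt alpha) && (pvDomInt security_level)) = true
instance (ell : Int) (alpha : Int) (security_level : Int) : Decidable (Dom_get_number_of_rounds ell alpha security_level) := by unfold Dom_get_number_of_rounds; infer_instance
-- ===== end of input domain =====

-- B replaces A's linear scan over r with a binary search for the least r meeting the
-- (monotone) combinatorial threshold, and drops the unused kappa lookup: an alternative
-- decomposition of the same computation.


-- ===== PORT A =====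
-- math.comb; equals Nat.choose (proved below), written with factorials so it evaluates fast
def pyComb (n k : Nat) : Nat :=
  if k ≤ n then n.factorial / (k.factorial * (n - k).factorial) else 0

-- the for-loop of A over the remaining values of range(100)
def aLoop (ell alpha sl : Int) : List Int → Int
  | [] => 10
  | r :: rs =>
    let _k : Int := if alpha < 10 then (PySem.List.pyGet? [1,1,1,1,2,2,4,4,7,7] alpha).getD 0 else 9
    -- comb's arguments are nonnegative on every evaluated iteration under Pre_, so .toNat is exact
    let c0 : Int := (pyComb (2*ell*r + alpha + 1 + 2*(ell*r - 2)).toNat (2*ell*r).toNat : Int)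
    let c_alg := c0 * c0
    if sl ≤ c_alg then max 10 (r + 1 + ell) else aLoop ell alpha sl rs

def get_number_of_rounds (ell : Int) (alpha : Int) (security_level : Int) : Int :=
  let sl : Int := 1 <<< security_level.toNat   -- 1 << security_level; exact for security_level ≥ 0 (Pre_)
  aLoop ell alpha sl (PySem.List.pyRange 0 100 1)

-- ===== PORT B =====
def meets (ell alpha sl : Int) (r : Int) : Bool :=
  let c : Int := (pyComb (2*ell*r + alpha + 1 + 2*(ell*r - 2)).toNat (2*ell*r).toNat : Int)
  decide (sl ≤ c * c)

-- the while-loop of B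
def bsearch (ell alpha sl : Int) (lo hi : Int) : Int :=
  if h : lo < hi then
    let mid := PySem.Int.floordiv (lo + hi) 2
    if meets ell alpha sl mid then bsearch ell alpha sl lo mid
    else bsearch ell alpha sl (mid + 1) hi
  else lo
termination_by (hi - lo).toNat
decreasing_by
  · have h2 := (PySem.Int.floordiv_lt_iff_lt_mul (a := lo + hi) (b := 2) (q := hi) (by norm_num)).mpr (by omega)
    omega
  · have h1 := PySem.Int.floordiv_two_mid_bounds (le_of_lt h)
    omega

def get_number_of_rounds_alt (ell : Int) (alpha : Int) (security_level : Int) : Int :=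
  let sl : Int := 1 <<< security_level.toNat   -- 1 << security_level; exact for security_level ≥ 0 (Pre_)
  let lo := bsearch ell alpha sl 0 100
  if lo < 100 then max 10 (lo + 1 + ell) else 10

-- ===== PRECONDITION & SPEC =====
-- Pre_ excludes security_level < 0 and alpha < 3, where A raises (1 << negative, or comb with a
-- negative argument at r = 0); it also excludes ell < 0, where A raises at r = 1 for every
-- security_level ≥ 1 and where, in the accidental security_level = 0 shortcut, A returns 10 via
-- the r = 0 iteration but B's binary search probes comb at a negative argument and raises.
def Pre_get_number_of_rounds (ell : Int) (alpha : Int) (security_level : Int) : Prop :=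
  0 ≤ ell ∧ 3 ≤ alpha ∧ 0 ≤ security_level
instance (ell : Int) (alpha : Int) (security_level : Int) : Decidable (Pre_get_number_of_rounds ell alpha security_level) := by unfold Pre_get_number_of_rounds; infer_instance

def pvWitness_get_number_of_rounds : Int × Int × Int := (1, 3, 4)

def Spec_get_number_of_rounds (ell : Int) (alpha : Int) (security_level : Int) (out : Int) : Prop := out = get_number_of_rounds_alt ell alpha security_level
instance (ell : Int) (alpha : Int) (security_level : Int) (out : Int) : Decidable (Spec_get_number_of_rounds ell alpha security_level out) := by unfold Spec_get_number_of_rounds; infer_instance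

-- ===== CLAIM (what is proved, stated in full; the proofs are below) =====
def Claim_equal_get_number_of_rounds : Prop := ∀ (ell : Int) (alpha : Int) (security_level : Int), Dom_get_number_of_rounds ell alpha security_level → Pre_get_number_of_rounds ell alpha security_level → Spec_get_number_of_rounds ell alpha security_level (get_number_of_rounds ell alpha security_level)

-- ===== LEMMAS AND PROOFS =====

theorem pyComb_eq_choose (n k : Nat) : pyComb n k = n.choose k := by
  unfold pyComb
  split
  · exact (Nat.choose_eq_factorial_div_factorial ‹_›).symm
  · exact (Nat.choose_eq_zero_of_lt (by omega)).symm

theorem choose_le_add2 (n k : Nat) : n.choose k ≤ (n + 2).choose (k + 1) := by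
  calc n.choose k ≤ (n + 1).choose (k + 1) := by
        rw [Nat.choose_succ_succ]; omega
    _ ≤ (n + 2).choose (k + 1) := Nat.choose_le_choose _ (by omega)

theorem choose_le_shift (m n k : Nat) : n.choose k ≤ (n + 2 * m).choose (k + m) := by
  induction m with
  | zero => simp
  | succ m ih =>
      calc n.choose k ≤ (n + 2 * m).choose (k + m) := ih
        _ ≤ (n + 2 * m + 2).choose (k + m + 1) := choose_le_add2 _ _
        _ = (n + 2 * (m + 1)).choose (k + (m + 1)) := by ring_nf

-- monotonicity of the threshold predicate in r
theorem meets_mono (ell alpha sl : Int) (hell : 0 ≤ ell) (ha : 3 ≤ alpha)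
    {r₁ r₂ : Int} (h1 : 0 ≤ r₁) (h12 : r₁ ≤ r₂)
    (hm : meets ell alpha sl r₁ = true) : meets ell alpha sl r₂ = true := by
  induction r₂, h12 using Int.le_induction with
  | base => exact hm
  | succ r hr ih =>
    have h0r : 0 ≤ r := le_trans h1 hr
    have hm' := ih
    -- one step: from r to r + 1
    unfold meets at hm' ⊢
    simp only [decide_eq_true_iff] at hm' ⊢
    set E := ell.toNat with hE
    set R := r.toNat with hR
    have heq : ell = (E : Int) := (Int.toNat_of_nonneg hell).symm
    have hreq : r = (R : Int) := (Int.toNat_of_nonneg h0r).symm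
    have hP : ell * r = ((E * R : Nat) : Int) := by rw [heq, hreq]; push_cast; ring
    have hP' : ell * (r + 1) = ((E * R + E : Nat) : Int) := by rw [heq, hreq]; push_cast; ring
    have e1 : 2*ell*r + alpha + 1 + 2*(ell*r - 2) = ((E * R : Nat) : Int) * 4 + alpha - 3 := by
      rw [← hP]; ring
    have e2 : (2*ell*r : Int) = ((E * R : Nat) : Int) * 2 := by rw [← hP]; ring
    have e1' : 2*ell*(r+1) + alpha + 1 + 2*(ell*(r+1) - 2)
        = ((E * R + E : Nat) : Int) * 4 + alpha - 3 := by rw [← hP']; ring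
    have e2' : (2*ell*(r+1) : Int) = ((E * R + E : Nat) : Int) * 2 := by rw [← hP']; ring
    rw [e1, e2] at hm'
    rw [e1', e2']
    -- reduce the toNats to explicit Nat expressions
    have t1 : (((E * R : Nat) : Int) * 4 + alpha - 3).toNat = 4 * (E * R) + (alpha.toNat - 3) := by
      omega
    have t2 : ((((E * R : Nat) : Int)) * 2).toNat = 2 * (E * R) := by omega
    have t1' : (((E * R + E : Nat) : Int) * 4 + alpha - 3).toNat
        = 4 * (E * R) + (alpha.toNat - 3) + 2 * (2 * E) := by omega
    have t2' : ((((E * R + E : Nat) : Int)) * 2).toNat = 2 * (E * R) + 2 * E := by omega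
    rw [t1, t2] at hm'
    rw [t1', t2']
    set N := 4 * (E * R) + (alpha.toNat - 3)
    set K := 2 * (E * R)
    have hch : pyComb N K ≤ pyComb (N + 2 * (2 * E)) (K + 2 * E) := by
      rw [pyComb_eq_choose, pyComb_eq_choose]
      exact choose_le_shift (2 * E) N K
    have hc : (pyComb N K : Int) ≤ (pyComb (N + 2 * (2 * E)) (K + 2 * E) : Int) := by
      exact_mod_cast hch
    have h0 : (0 : Int) ≤ (pyComb N K : Int) := by positivity
    nlinarith [hm', hc, h0]

-- the "least index" characterisation shared by the two loops
def IsLeast100 (ell alpha sl L : Int) : Prop :=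
  0 ≤ L ∧ L ≤ 100 ∧ (∀ i, 0 ≤ i → i < L → meets ell alpha sl i = false) ∧
    (L < 100 → meets ell alpha sl L = true)

-- A's branch condition is exactly `meets`
theorem aLoop_cons (ell alpha sl : Int) (r : Int) (rs : List Int) :
    aLoop ell alpha sl (r :: rs)
      = if meets ell alpha sl r then max 10 (r + 1 + ell) else aLoop ell alpha sl rs := by
  simp only [aLoop, meets, decide_eq_true_eq]

-- A's scan returns Out(L) for the least L
theorem aLoop_eq (ell alpha sl : Int) :
    ∀ (n : Nat) (a : Int), a + n = 100 → 0 ≤ a →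
    ∀ L : Int, a ≤ L → L ≤ 100 →
      (∀ i, a ≤ i → i < L → meets ell alpha sl i = false) →
      (L < 100 → meets ell alpha sl L = true) →
      aLoop ell alpha sl (PySem.List.pyRange a 100 1)
        = if L < 100 then max 10 (L + 1 + ell) else 10 := by
  intro n
  induction n with
  | zero =>
    intro a ha _ L hL1 hL2 _ _
    have : a = 100 := by omega
    subst this
    have hL : L = 100 := by omega
    rw [PySem.List.pyRange_one_eq_nil (by omega)]
    simp [aLoop, hL]
  | succ n ih =>
    intro a ha h0a L hL1 hL2 hbelow htop
    have halt : a < 100 := by omega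
    rw [PySem.List.pyRange_one_cons halt, aLoop_cons]
    by_cases hm : meets ell alpha sl a = true
    · have hLa : L = a := by
        by_contra h
        have : a < L := by omega
        have := hbelow a le_rfl this
        simp_all
      subst hLa
      simp [hm, halt]
    · have hLa : a < L := by
        by_contra h
        have : L = a := by omega
        subst this
        exact hm (htop halt)
      simp only [hm, if_false, Bool.false_eq_true]
      exact ih (a + 1) (by omega) (by omega) L (by omega) hL2
        (fun i hi1 hi2 => hbelow i (by omega) hi2) htop

-- B's binary search returns the least L (given monotonicity)
theorem bsearch_least (ell alpha sl : Int) (hell : 0 ≤ ell) (ha : 3 ≤ alpha) :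
    ∀ (n : Nat) (lo hi : Int), (hi - lo).toNat = n → 0 ≤ lo → lo ≤ hi → hi ≤ 100 →
      (∀ i, 0 ≤ i → i < lo → meets ell alpha sl i = false) →
      (∀ i, hi ≤ i → i < 100 → meets ell alpha sl i = true) →
      IsLeast100 ell alpha sl (bsearch ell alpha sl lo hi) := by
  intro n
  induction n using Nat.strong_induction_on with
  | _ n ih =>
    intro lo hi hn h0 hlh hhi hbelow habove
    rw [bsearch]
    by_cases h : lo < hi
    · simp only [h, dif_pos]
      have hmid := PySem.Int.floordiv_two_mid_bounds (le_of_lt h)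
      have hmidlt' := (PySem.Int.floordiv_lt_iff_lt_mul (a := lo + hi) (b := 2) (q := hi) (by norm_num)).mpr (by omega)
      set mid := PySem.Int.floordiv (lo + hi) 2 with hm
      have hmidlt : mid < hi := hmidlt'
      by_cases hme : meets ell alpha sl mid = true
      · simp only [hme, if_true]
        exact ih (mid - lo).toNat (by omega) lo mid rfl h0 (by omega) (by omega) hbelow
          (fun i hi1 hi2 => meets_mono ell alpha sl hell ha (by omega) hi1 hme)
      · simp only [hme]
        refine ih (hi - (mid + 1)).toNat (by omega) (mid + 1) hi rfl (by omega) (by omega) hhi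
          (fun i hi1 hi2 => ?_) habove
        by_cases hil : i < lo
        · exact hbelow i hi1 hil
        · by_contra hc
          have : meets ell alpha sl i = true := by
            cases hmi : meets ell alpha sl i <;> simp_all
          exact hme (meets_mono ell alpha sl hell ha hi1 (by omega) this)
    · simp only [h, dif_neg, not_false_iff]
      have : lo = hi := by omega
      exact ⟨h0, by omega, hbelow, fun hlt => habove lo (by omega) hlt⟩

-- ===== VERDICT (by name: the statement is the Claim_ definition above) =====
theorem get_number_of_rounds_spec : Claim_equal_get_number_of_rounds := by
  intro ell alpha security_level _ hpre
  obtain ⟨hell, ha, hs⟩ := hpre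
  unfold Spec_get_number_of_rounds get_number_of_rounds get_number_of_rounds_alt
  set sl : Int := (1 : Int) <<< security_level.toNat with hsl
  have hB := bsearch_least ell alpha sl hell ha 100 0 100 (by decide) (by decide)
    (by decide) (by decide) (fun i h1 h2 => absurd h1 (by omega))
    (fun i h1 h2 => absurd h1 (by omega))
  obtain ⟨b1, b2, b3, b4⟩ := hB
  set L := bsearch ell alpha sl 0 100 with hL
  have hA := aLoop_eq ell alpha sl 100 0 (by decide) (by decide) L b1 b2
    (fun i h1 h2 => b3 i h1 h2) b4
  simpa using hA
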